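-- pv_equiv track=rewrite | github.com/Junhee8649/BaekjoonPython | src/1439.py | target
-- ===== SOURCE A (Python) =====
-- def target(num, S):
--   i = 0
--   count = 0
--   already = False
--   while i < len(S):
--     if S[i] == num:
--       if not already:
--         count += 1
--         already = True
--     else:
--       already = False
--     i += 1
--   return count
-- ===== SOURCE B (Python) =====
-- def target(num, S):
--     count = 0
--     i = 0
--     n = len(S)
--     while i < n:
--         c = S[i]
--         j = i + 1
--         while j < n and S[j] == c:  # skip the whole maximal run of c
--             j += 1
--         if c == num:
--             count += 1
--         i = j
--     return count
-- ===== Notes on version B (the rewrite author's own statement) =====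
-- stated objective: alternative
-- what changed: B iterates over maximal runs of equal characters (an inner loop skips each whole run, counting the run once if its character equals num) instead of A's char-by-char scan with an 'already' flag.
import Mathlib
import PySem

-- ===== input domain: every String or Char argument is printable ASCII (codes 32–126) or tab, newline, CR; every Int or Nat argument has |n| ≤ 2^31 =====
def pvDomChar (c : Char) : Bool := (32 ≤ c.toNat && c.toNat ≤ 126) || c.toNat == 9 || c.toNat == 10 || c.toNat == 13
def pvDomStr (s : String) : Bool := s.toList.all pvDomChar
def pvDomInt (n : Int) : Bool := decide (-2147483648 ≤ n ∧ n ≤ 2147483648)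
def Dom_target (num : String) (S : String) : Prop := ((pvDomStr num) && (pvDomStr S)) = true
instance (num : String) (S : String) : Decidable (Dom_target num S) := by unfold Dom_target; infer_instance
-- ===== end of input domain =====

-- B iterates over maximal runs of equal characters instead of A's char-by-char scan with an 'already' flag.

-- ===== PORT A =====
-- A's while loop over indices, carried as structural recursion over the character
-- list with the same (count, already) state; S[i] == num compares the one-char
-- string S[i] with num, exactly as in Python.
def targetLoop (num : String) : List Char → Bool → Int → Int
  | [], _, count => count
  | c :: rest, already, count =>
    if String.ofList [c] == num then
      if !already then targetLoop num rest true (count + 1)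
      else targetLoop num rest already count
    else targetLoop num rest false count

def target (num : String) (S : String) : Int := targetLoop num S.toList false 0

-- ===== PORT B =====
-- B's outer while loop takes one maximal run per step: the inner
-- 'while j < n and S[j] == c' is the dropWhile skipping the rest of the run.
def altLoop (num : String) : List Char → Int → Int
  | [], count => count
  | c :: rest, count =>
    altLoop num (rest.dropWhile (· == c))
      (if String.ofList [c] == num then count + 1 else count)
termination_by l => l.length
decreasing_by
  simpa using Nat.lt_succ_of_le (List.length_dropWhile_le _ _)

def target_alt (num : String) (S : String) : Int := altLoop num S.toList 0

-- ===== PRECONDITION & SPEC =====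
def Spec_target (num : String) (S : String) (out : Int) : Prop := out = target_alt num S
instance (num : String) (S : String) (out : Int) : Decidable (Spec_target num S out) := by unfold Spec_target; infer_instance

-- ===== CLAIM (what is proved, stated in full; the proofs are below) =====
def Claim_equal_target : Prop := ∀ (num : String) (S : String), Dom_target num S → Spec_target num S (target num S)

-- ===== LEMMAS AND PROOFS =====

-- With already = true, A's loop only skips characters matching num (and resets
-- already at the first non-matching one).
theorem targetLoop_true (num : String) (l : List Char) :
    ∀ count : Int, targetLoop num l true count =
      targetLoop num (l.dropWhile (fun d => String.ofList [d] == num)) false count := by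
  induction l with
  | nil => intro count; simp [targetLoop, List.dropWhile]
  | cons c rest ih =>
    intro count
    by_cases h : (String.ofList [c] == num) = true
    · simp [targetLoop, List.dropWhile, h, ih]
    · simp [targetLoop, List.dropWhile, h]

-- With already = false, characters equal to a non-matching c are skipped without
-- changing the state.
theorem targetLoop_false_skip (num : String) (c : Char)
    (hc : (String.ofList [c] == num) = false) (l : List Char) :
    ∀ count : Int, targetLoop num l false count =
      targetLoop num (l.dropWhile (· == c)) false count := by
  induction l with
  | nil => intro count; simp [List.dropWhile]
  | cons d rest ih =>
    intro count
    by_cases hd : (d == c) = true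
    · have hdc : d = c := by simpa using hd
      have : (String.ofList [d] == num) = false := by rw [hdc]; exact hc
      simp [targetLoop, List.dropWhile, hd, this, ih]
    · simp [List.dropWhile, hd]

-- When String.ofList [c] = num, matching num is the same as being equal to c.
theorem pred_congr (num : String) (c : Char) (hc : (String.ofList [c] == num) = true) :
    (fun d => String.ofList [d] == num) = (fun d : Char => d == c) := by
  have hc' : String.ofList [c] = num := by simpa using hc
  funext d
  by_cases h : d = c
  · simp [h, hc']
  · have : ¬ String.ofList [d] = num := by
      rw [← hc']
      intro hdc
      exact h (by simpa using congrArg String.toList hdc)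
    simp [h, this]

theorem loop_agree (num : String) : ∀ (n : ℕ) (l : List Char), l.length ≤ n →
    ∀ count : Int, targetLoop num l false count = altLoop num l count := by
  intro n
  induction n with
  | zero =>
    intro l hl count
    have : l = [] := List.length_eq_zero_iff.mp (Nat.le_zero.mp hl)
    subst this
    simp [targetLoop, altLoop]
  | succ n ih =>
    intro l hl count
    cases l with
    | nil => simp [targetLoop, altLoop]
    | cons c rest =>
      have hlen : (rest.dropWhile (· == c)).length ≤ n :=
        Nat.le_trans (List.length_dropWhile_le _ _) (Nat.succ_le_succ_iff.mp hl)
      by_cases h : (String.ofList [c] == num) = true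
      · calc targetLoop num (c :: rest) false count
            = targetLoop num rest true (count + 1) := by simp [targetLoop, h]
          _ = targetLoop num (rest.dropWhile (fun d => String.ofList [d] == num)) false (count + 1) :=
              targetLoop_true num rest (count + 1)
          _ = targetLoop num (rest.dropWhile (· == c)) false (count + 1) := by
              rw [pred_congr num c h]
          _ = altLoop num (rest.dropWhile (· == c)) (count + 1) := ih _ hlen _
          _ = altLoop num (c :: rest) count := by rw [altLoop]; simp [h]
      · calc targetLoop num (c :: rest) false count
            = targetLoop num rest false count := by simp [targetLoop, h]
          _ = targetLoop num (rest.dropWhile (· == c)) false count :=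
              targetLoop_false_skip num c (by simpa using h) rest count
          _ = altLoop num (rest.dropWhile (· == c)) count := ih _ hlen _
          _ = altLoop num (c :: rest) count := by rw [altLoop]; simp [h]

-- ===== VERDICT (by name: the statement is the Claim_ definition above) =====
theorem target_spec : Claim_equal_target := by
  intro num S _
  unfold Spec_target target target_alt
  exact loop_agree num S.toList.length S.toList le_rfl 0
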